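-- pv_equiv track=rewrite | github.com/horimpark/code-playground | codewars/6kyu/Separating Strings.py | sep_str
-- ===== SOURCE A (Python) =====
-- def sep_str(st):
--     split_st = st.split(' ')
--     max_len = max([len(x) for x in split_st])
--
--     sep_st = []
--     for x in split_st:
--         sep = [y for y in x]
--         if max_len != len(sep):
--             for i in range(max_len - len(sep)):
--                 sep.extend([''])
--         sep_st.append(sep)
--
--     result = []
--     for col in range(len(sep_st[0])):
--         tmp = []
--         for row in range(len(sep_st)):
--             tmp.append(sep_st[row][col])
--         result.append(tmp)
--     return result
-- ===== SOURCE B (Python) =====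
-- def sep_str(st):
--     cols = []
--     seen = 0
--     for w in st.split(' '):
--         for i, ch in enumerate(w):
--             if i < len(cols):
--                 cols[i].append(ch)
--             else:
--                 cols.append([''] * seen + [ch])
--         for i in range(len(w), len(cols)):
--             cols[i].append('')
--         seen += 1
--     return cols
-- ===== Notes on version B (the rewrite author's own statement) =====
-- stated objective: alternative
-- what changed: B builds the output columns directly in a single left-to-right pass over the words, scattering each character into its column list (creating new columns on demand, back-filled with one empty string per previously seen word) and appending an empty string to columns the current word does not reach; A instead pads every word to the precomputed max length and then transposes the padded matrix with an index-based double loop.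
import Mathlib
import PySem

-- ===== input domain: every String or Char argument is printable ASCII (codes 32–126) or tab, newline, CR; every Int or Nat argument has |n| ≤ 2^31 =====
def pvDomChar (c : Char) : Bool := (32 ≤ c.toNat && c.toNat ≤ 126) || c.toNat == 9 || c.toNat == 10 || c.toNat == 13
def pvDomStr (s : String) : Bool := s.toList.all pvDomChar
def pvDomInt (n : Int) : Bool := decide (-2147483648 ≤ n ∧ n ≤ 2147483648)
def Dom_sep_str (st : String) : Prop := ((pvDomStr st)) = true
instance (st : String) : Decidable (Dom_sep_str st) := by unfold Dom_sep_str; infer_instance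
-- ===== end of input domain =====

-- B builds the output columns directly in one pass over the words (scattering each character into
-- its column, creating or back-filling columns as it goes) instead of A's pad-to-max-then-transpose:
-- a different algorithm of the same cost.

-- ===== PORT A =====
def sep_str (st : String) : List (List String) :=
  let split_st := (PySem.Str.split? st " ").getD []  -- separator " " ≠ "", so split? is always some
  -- max() raises only on an empty list; split always yields at least one piece, so the default is never used
  let max_len : Int := (PySem.List.max? (split_st.map (fun x => PySem.Str.len x)) (fun y => y)).getD 0
  let sep_st := split_st.foldl (fun sep_st x =>
      let sep := x.toList.map (fun y => String.ofList [y])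
      let sep := if max_len ≠ (sep.length : Int) then
          (PySem.List.pyRange 0 (max_len - (sep.length : Int))).foldl (fun sep _ => sep ++ [""]) sep
        else sep
      sep_st ++ [sep]) []
  -- sep_st[0], sep_st[row], …[col]: indices always in range (all rows padded to max_len), so the defaults are never used
  (PySem.List.pyRange 0 (((sep_st.headD []).length : Int))).foldl (fun result col =>
      result ++ [(PySem.List.pyRange 0 ((sep_st.length : Int))).foldl (fun tmp row =>
          tmp ++ [PySem.List.pyGetD (PySem.List.pyGetD sep_st row []) col ""]) []]) []

-- ===== PORT B =====
-- Source B's 'for i, ch in enumerate(w)' loop body: place ch into column i (appending a fresh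
-- column ['']*seen + [ch] when i is past the current columns), transcribed as index recursion
def pvScatter (cols : List (List String)) (seen : Nat) (i : Nat) : List String → List (List String)
  | [] => cols
  | ch :: t =>
    if i < cols.length then pvScatter (cols.modify i (· ++ [ch])) seen (i + 1) t
    else pvScatter (cols ++ [List.replicate seen "" ++ [ch]]) seen (i + 1) t

def sep_str_alt (st : String) : List (List String) :=
  let split_st := (PySem.Str.split? st " ").getD []  -- separator " " ≠ "", so split? is always some
  (split_st.foldl (fun (acc : List (List String) × Nat) w =>
      let cols := pvScatter acc.1 acc.2 0 (w.toList.map (fun c => String.ofList [c]))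
      -- 'for i in range(len(w), len(cols)): cols[i].append('')': i is ≥ 0 and < len(cols), so .toNat is exact
      let cols := (PySem.List.pyRange (PySem.Str.len w) ((cols.length : Int)) 1).foldl
          (fun cols j => cols.modify j.toNat (· ++ [""])) cols
      (cols, acc.2 + 1)) ([], 0)).1

-- ===== PRECONDITION & SPEC =====
def Spec_sep_str (st : String) (out : List (List String)) : Prop := out = sep_str_alt st
instance (st : String) (out : List (List String)) : Decidable (Spec_sep_str st out) := by unfold Spec_sep_str; infer_instance

-- ===== CLAIM (what is proved, stated in full; the proofs are below) =====
def Claim_equal_sep_str : Prop := ∀ (st : String), Dom_sep_str st → Spec_sep_str st (sep_str st)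

-- ===== LEMMAS AND PROOFS =====

-- the maximum row length, as a Nat
def pvMaxLen (rows : List (List String)) : Nat := (rows.map List.length).foldr max 0

theorem pvMaxLen_le (rows : List (List String)) (r : List String) (hr : r ∈ rows) :
    r.length ≤ pvMaxLen rows := by
  induction rows with
  | nil => simp at hr
  | cons q qs ih =>
    rcases List.mem_cons.mp hr with h | h
    · subst h; simp [pvMaxLen]
    · have := ih h
      simp only [pvMaxLen, List.map_cons, List.foldr_cons] at *
      omega

theorem pvFoldrMax (l : List Nat) : ∀ (a : Nat), l.foldr max a = max (l.foldr max 0) a := by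
  induction l with
  | nil => intro a; simp
  | cons b t ih =>
    intro a
    rw [List.foldr_cons, List.foldr_cons, ih a]
    omega

theorem pvMaxLen_append_single (rows : List (List String)) (r : List String) :
    pvMaxLen (rows ++ [r]) = max (pvMaxLen rows) r.length := by
  simp only [pvMaxLen, List.map_append, List.foldr_append, List.map_cons, List.map_nil,
    List.foldr_cons, List.foldr_nil]
  rw [pvFoldrMax]
  omega

-- the canonical padded transpose both programs compute
def pvCols (rows : List (List String)) : List (List String) :=
  (List.range (pvMaxLen rows)).map (fun c => rows.map (fun r => r.getD c ""))

-- padding a row with "" never changes getD-with-default-""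
theorem pvPad_getD (r : List String) (k c : Nat) :
    (r ++ List.replicate k "").getD c "" = r.getD c "" := by
  by_cases hc : c < r.length
  · rw [List.getD_append _ _ _ _ hc]
  · have h1 : r[c]? = none := by rw [List.getElem?_eq_none_iff]; omega
    rw [List.getD_eq_getElem?_getD, List.getD_eq_getElem?_getD,
      List.getElem?_append_right (by omega), h1]
    simp only [List.getElem?_replicate]
    split_ifs <;> simp

-- appending [v] once per loop iteration is appending a replicate
theorem pvFoldAppend {α β : Type} (xs : List β) (v : α) : ∀ (l : List α),
    xs.foldl (fun s _ => s ++ [v]) l = l ++ List.replicate xs.length v := by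
  induction xs with
  | nil => simp
  | cons x t ih =>
    intro l
    simp [ih, List.replicate_succ]

theorem pvFoldlMax (l : List Nat) : ∀ (a : Nat), l.foldl max a = max a (l.foldr max 0) := by
  induction l with
  | nil => intro a; simp
  | cons b t ih => intro a; simp only [List.foldl_cons, List.foldr_cons, ih]; omega

theorem pvFoldlMaxInt (ws : List String) : ∀ (a : Nat),
    List.foldl max (a : Int) (ws.map (fun x => ((x.toList.length : Nat) : Int)))
      = ((List.foldl max a (ws.map (fun w => w.toList.length)) : Nat) : Int) := by
  induction ws with
  | nil => intro a; simp
  | cons w t ih =>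
    intro a
    simp only [List.map_cons, List.foldl_cons]
    rw [show (max (a : Int) ((w.toList.length : Nat) : Int)) = ((max a w.toList.length : Nat) : Int) by
        simp [Nat.cast_max],
      ih]

-- A's max_len equals the Nat maximum of the char-row lengths, as an Int
theorem pvMaxLen_int (split_st : List String) :
    (PySem.List.max? (split_st.map (fun x => PySem.Str.len x)) (fun y => y)).getD 0
      = (pvMaxLen (split_st.map (fun w => w.toList.map (fun c => String.ofList [c]))) : Int) := by
  cases split_st with
  | nil => simp [pvMaxLen, PySem.List.max?]
  | cons w ws =>
    simp only [List.map_cons, PySem.List.max?_id_cons, Option.getD_some, PySem.Str.len_eq]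
    rw [pvFoldlMaxInt ws w.toList.length]
    congr 1
    rw [pvFoldlMax]
    simp [pvMaxLen, List.map_map, Function.comp_def]

-- reading a list element-by-index with a default is just the list
theorem pvMapRangeGetD {α β : Type} (f : α → β) (d : α) : ∀ (xs : List α),
    (List.range xs.length).map (fun i => f (xs.getD i d)) = xs.map f := by
  intro xs
  induction xs with
  | nil => simp
  | cons x t ih =>
    simp only [List.length_cons, List.range_succ_eq_map, List.map_cons, List.map_map]
    refine List.cons_eq_cons.mpr ⟨by simp, ?_⟩
    simpa [Function.comp_def] using ih

-- A's padding loop is appending a replicate of ""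
theorem pvPadBody (m : Nat) (sep : List String) (hle : sep.length ≤ m) :
    (if (m : Int) ≠ (sep.length : Int) then
        (PySem.List.pyRange 0 ((m : Int) - (sep.length : Int))).foldl (fun sep _ => sep ++ [""]) sep
      else sep)
      = sep ++ List.replicate (m - sep.length) "" := by
  by_cases heq : (m : Int) = (sep.length : Int)
  · have : m - sep.length = 0 := by omega
    simp [heq, this]
  · have hcast : (m : Int) - (sep.length : Int) = ((m - sep.length : Nat) : Int) := by
      omega
    rw [if_pos heq, hcast, PySem.List.pyRange_zero_natCast, pvFoldAppend]
    simp

-- A's row-building loop produces exactly the ""-padded char rows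
theorem pvSepSt (S : List String) :
    S.foldl (fun sep_st x =>
      sep_st ++ [if ((pvMaxLen (S.map (fun w => w.toList.map (fun c => String.ofList [c]))) : Int)) ≠ ((x.toList.map (fun y => String.ofList [y])).length : Int) then
          (PySem.List.pyRange 0 ((pvMaxLen (S.map (fun w => w.toList.map (fun c => String.ofList [c]))) : Int) - ((x.toList.map (fun y => String.ofList [y])).length : Int))).foldl (fun sep _ => sep ++ [""]) (x.toList.map (fun y => String.ofList [y]))
        else x.toList.map (fun y => String.ofList [y])]) []
    = (S.map (fun w => w.toList.map (fun c => String.ofList [c]))).map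
        (fun r => r ++ List.replicate (pvMaxLen (S.map (fun w => w.toList.map (fun c => String.ofList [c]))) - r.length) "") := by
  rw [PySem.List.foldl_append_singleton_eq_map, List.map_map]
  apply List.map_congr_left
  intro x hx
  exact pvPadBody _ _ (pvMaxLen_le _ _ (List.mem_map_of_mem hx))

-- A's index-based double loop is the canonical transpose of its input
theorem pvTranspose (ps : List (List String)) :
    (PySem.List.pyRange 0 (((ps.headD []).length : Int))).foldl (fun result col =>
      result ++ [(PySem.List.pyRange 0 ((ps.length : Int))).foldl (fun tmp row =>
          tmp ++ [PySem.List.pyGetD (PySem.List.pyGetD ps row []) col ""]) []]) []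
    = (List.range (ps.headD []).length).map (fun c => ps.map (fun r => r.getD c "")) := by
  rw [PySem.List.foldl_append_singleton_eq_map, List.nil_append,
    PySem.List.pyRange_zero_natCast ((ps.headD []).length), List.map_map]
  apply List.map_congr_left
  intro c _
  rw [Function.comp_apply, PySem.List.foldl_append_singleton_eq_map, List.nil_append,
    PySem.List.pyRange_zero_natCast ps.length, List.map_map]
  simp only [Function.comp_def, PySem.List.pyGetD_natCast]
  exact pvMapRangeGetD (fun r => r.getD c "") [] ps

theorem sep_str_eq_pvCols (st : String) :
    sep_str st = pvCols (((PySem.Str.split? st " ").getD []).map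
      (fun w => w.toList.map (fun c => String.ofList [c]))) := by
  simp only [sep_str]
  rw [pvMaxLen_int]
  rw [pvSepSt, pvTranspose]
  generalize (PySem.Str.split? st " ").getD [] = S
  cases S with
  | nil => simp [pvCols, pvMaxLen]
  | cons w ws =>
    have hlen : ((w.toList.map (fun c => String.ofList [c])) ++
        List.replicate (pvMaxLen ((w :: ws).map (fun w => w.toList.map (fun c => String.ofList [c]))) -
          (w.toList.map (fun c => String.ofList [c])).length) "").length
        = pvMaxLen ((w :: ws).map (fun w => w.toList.map (fun c => String.ofList [c]))) := by
      have := pvMaxLen_le ((w :: ws).map (fun w => w.toList.map (fun c => String.ofList [c])))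
        (w.toList.map (fun c => String.ofList [c])) (by simp)
      simp only [List.length_append, List.length_replicate]
      omega
    simp only [List.map_cons, List.headD_cons] at *
    rw [hlen]
    unfold pvCols
    simp only [List.map_cons]
    apply List.map_congr_left
    intro c _
    simp only [List.map_map, Function.comp_def]
    rw [pvPad_getD]
    refine List.cons_eq_cons.mpr ⟨rfl, ?_⟩
    apply List.map_congr_left
    intro r _
    exact pvPad_getD _ _ _

-- ===== B-side lemmas =====

-- modify on a mapped range, as a pointwise map
theorem pvModifyMapRange (n a : Nat) (f : Nat → List String) (g : List String → List String)
    (_ha : a < n) :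
    ((List.range n).map f).modify a g
      = (List.range n).map (fun c => if c = a then g (f c) else f c) := by
  apply List.ext_getElem
  · simp [List.length_modify]
  · intro j h1 h2
    simp only [List.length_modify, List.length_map, List.length_range] at h1
    rw [List.getElem_modify]
    simp only [List.getElem_map, List.getElem_range]
    split_ifs with h h' h' <;> first | rfl | omega

-- columns at or past the max length read "" from every row
theorem pvColsShort (rows : List (List String)) (c : Nat) (hc : pvMaxLen rows ≤ c) :
    rows.map (fun q => q.getD c "") = List.replicate rows.length "" := by
  rw [List.eq_replicate_iff]
  refine ⟨by simp, ?_⟩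
  intro b hb
  rcases List.mem_map.mp hb with ⟨q, hq, rfl⟩
  have := pvMaxLen_le rows q hq
  rw [List.getD_eq_getElem?_getD, List.getElem?_eq_none_iff.mpr (by omega)]
  rfl

-- the intermediate state of B's scatter: columns of rows plus r's first i characters placed
def pvMix (rows : List (List String)) (r : List String) (i : Nat) : List (List String) :=
  (List.range (max (pvMaxLen rows) i)).map (fun c =>
    rows.map (fun q => q.getD c "") ++ if c < i then [r.getD c ""] else [])

theorem pvScatter_eq (cs : List String) : ∀ (rows : List (List String)) (r : List String) (i : Nat),
    r.drop i = cs → i ≤ r.length →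
    pvScatter (pvMix rows r i) rows.length i cs = pvMix rows r r.length := by
  induction cs with
  | nil =>
    intro rows r i hd hle
    have hl : r.length - i = 0 := by
      have := congrArg List.length hd
      simpa [List.length_drop] using this
    have hi : i = r.length := by omega
    subst hi
    rfl
  | cons ch t ih =>
    intro rows r i hd hle
    have hilen : r.length - i = t.length + 1 := by
      have := congrArg List.length hd
      simpa [List.length_drop] using this
    have hi : i < r.length := by omega
    have hch : r[i]? = some ch := by
      have h := congrArg (fun l : List String => l[0]?) hd
      simpa using h
    have hgd : r.getD i "" = ch := by
      rw [List.getD_eq_getElem?_getD, hch]; rfl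
    have hdt : r.drop (i + 1) = t := by
      have h := congrArg List.tail hd
      simpa [List.tail_drop] using h
    have hlenc : (pvMix rows r i).length = max (pvMaxLen rows) i := by
      simp [pvMix]
    rw [pvScatter]
    by_cases hm : i < pvMaxLen rows
    · rw [if_pos (by rw [hlenc]; omega)]
      have hstep : (pvMix rows r i).modify i (· ++ [ch]) = pvMix rows r (i + 1) := by
        unfold pvMix
        rw [pvModifyMapRange _ i _ _ (by omega)]
        rw [show max (pvMaxLen rows) i = max (pvMaxLen rows) (i + 1) by omega]
        apply List.map_congr_left
        intro c hc
        by_cases hca : c = i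
        · subst hca
          rw [if_pos rfl, if_neg (by omega), if_pos (by omega), hgd]
          simp
        · rw [if_neg hca]
          have : (c < i) = (c < i + 1) := by
            by_cases h : c < i
            · simp [h]; omega
            · simp [h]; omega
          rw [show (if c < i then [r.getD c ""] else ([] : List String))
                = (if c < i + 1 then [r.getD c ""] else []) from by
              split_ifs with h1 h2 h2 <;> first | rfl | omega]
      rw [hstep]
      exact ih rows r (i + 1) hdt (by omega)
    · rw [if_neg (by rw [hlenc]; omega)]
      have hstep : pvMix rows r i ++ [List.replicate rows.length "" ++ [ch]]
          = pvMix rows r (i + 1) := by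
        unfold pvMix
        rw [show max (pvMaxLen rows) i = i by omega,
          show max (pvMaxLen rows) (i + 1) = i + 1 by omega,
          List.range_succ, List.map_append]
        congr 1
        · apply List.map_congr_left
          intro c hc
          rw [List.mem_range] at hc
          rw [if_pos hc, if_pos (by omega)]
        · rw [List.map_cons, List.map_nil, pvColsShort rows i (by omega), if_pos (by omega), hgd]
      rw [hstep]
      exact ih rows r (i + 1) hdt (by omega)

-- B's back-fill loop appends "" to every column from index a on
theorem pvPadCols (k : Nat) : ∀ (a : Nat) (f : Nat → List String),
    (List.range k).foldl (fun cs j => cs.modify (a + j) (· ++ [""])) ((List.range (a + k)).map f)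
      = (List.range (a + k)).map (fun c => if a ≤ c then f c ++ [""] else f c) := by
  induction k with
  | zero =>
    intro a f
    simp only [List.range_zero, List.foldl_nil, Nat.add_zero]
    apply List.map_congr_left
    intro c hc
    rw [List.mem_range] at hc
    rw [if_neg (by omega)]
  | succ k ih =>
    intro a f
    rw [List.range_succ_eq_map, List.foldl_cons, List.foldl_map]
    simp only [Nat.add_zero]
    rw [pvModifyMapRange (a + (k + 1)) a f _ (by omega)]
    have hfun : (fun (cs : List (List String)) (j : Nat) => cs.modify (a + j.succ) (· ++ [""]))
        = (fun cs j => cs.modify ((a + 1) + j) (· ++ [""])) := by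
      funext cs j
      congr 1
      omega
    rw [hfun, show a + (k + 1) = (a + 1) + k by omega,
      ih (a + 1) (fun c => if c = a then f c ++ [""] else f c)]
    apply List.map_congr_left
    intro c hc
    rw [List.mem_range] at hc
    by_cases hca : c = a
    · subst hca
      rw [if_neg (by omega), if_pos rfl, if_pos (by omega)]
    · rw [if_neg hca]
      by_cases h1 : a + 1 ≤ c
      · rw [if_pos h1, if_pos (by omega)]
      · rw [if_neg h1, if_neg (by omega)]

-- one word of B's fold turns the columns of `rows` into the columns of `rows ++ [r]`
theorem pvStep (rows : List (List String)) (w : String) :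
    (PySem.List.pyRange (PySem.Str.len w)
        (((pvScatter (pvCols rows) rows.length 0 (w.toList.map (fun c => String.ofList [c]))).length : Int)) 1).foldl
        (fun cols j => cols.modify j.toNat (· ++ [""]))
        (pvScatter (pvCols rows) rows.length 0 (w.toList.map (fun c => String.ofList [c])))
      = pvCols (rows ++ [w.toList.map (fun c => String.ofList [c])]) := by
  set r := w.toList.map (fun c => String.ofList [c]) with hr
  have hL : PySem.Str.len w = (r.length : Int) := by simp [PySem.Str.len_eq, hr]
  have hmix0 : pvCols rows = pvMix rows r 0 := by
    unfold pvCols pvMix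
    rw [Nat.max_zero]
    apply List.map_congr_left
    intro c hc
    rw [if_neg (by omega), List.append_nil]
  have hsc : pvScatter (pvCols rows) rows.length 0 r = pvMix rows r r.length := by
    rw [hmix0]
    exact pvScatter_eq r rows r 0 (by simp) (by omega)
  rw [hsc]
  have hlenm : (pvMix rows r r.length).length = max (pvMaxLen rows) r.length := by
    simp [pvMix]
  rw [hlenm, hL, PySem.List.pyRange_one]
  have htn : (((max (pvMaxLen rows) r.length : Nat) : Int) - ((r.length : Nat) : Int)).toNat
      = max (pvMaxLen rows) r.length - r.length := by omega
  rw [htn, List.foldl_map]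
  have hfun : (fun (cs : List (List String)) (k : Nat) => cs.modify (((r.length : Nat) : Int) + (k : Nat)).toNat (· ++ [""]))
      = (fun cs k => cs.modify (r.length + k) (· ++ [""])) := by
    funext cs k
    have h : (((r.length : Nat) : Int) + ((k : Nat) : Int)).toNat = r.length + k := by omega
    rw [h]
  rw [hfun]
  have hmixn : pvMix rows r r.length
      = (List.range (r.length + (max (pvMaxLen rows) r.length - r.length))).map
        (fun c => rows.map (fun q => q.getD c "") ++ if c < r.length then [r.getD c ""] else []) := by
    unfold pvMix
    rw [show r.length + (max (pvMaxLen rows) r.length - r.length) = max (pvMaxLen rows) r.length by omega]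
  rw [hmixn, pvPadCols (max (pvMaxLen rows) r.length - r.length) r.length _]
  unfold pvCols
  rw [pvMaxLen_append_single,
    show r.length + (max (pvMaxLen rows) r.length - r.length) = max (pvMaxLen rows) r.length by omega]
  apply List.map_congr_left
  intro c hc
  rw [List.mem_range] at hc
  rw [List.map_append, List.map_cons, List.map_nil]
  by_cases hcl : c < r.length
  · rw [if_neg (by omega), if_pos hcl]
  · rw [if_pos (by omega), if_neg hcl, List.append_nil]
    have hget : r.getD c "" = "" := by
      rw [List.getD_eq_getElem?_getD, List.getElem?_eq_none_iff.mpr (by omega)]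
      rfl
    rw [hget]

-- B's whole fold over the words computes the canonical padded transpose
theorem pvFoldB (S : List String) : ∀ (rows : List (List String)),
    S.foldl (fun (acc : List (List String) × Nat) w =>
        ((PySem.List.pyRange (PySem.Str.len w)
            (((pvScatter acc.1 acc.2 0 (w.toList.map (fun c => String.ofList [c]))).length : Int)) 1).foldl
            (fun cols j => cols.modify j.toNat (· ++ [""]))
            (pvScatter acc.1 acc.2 0 (w.toList.map (fun c => String.ofList [c]))),
          acc.2 + 1)) (pvCols rows, rows.length)
      = (pvCols (rows ++ S.map (fun w => w.toList.map (fun c => String.ofList [c]))), rows.length + S.length) := by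
  induction S with
  | nil => intro rows; simp
  | cons w t ih =>
    intro rows
    rw [List.foldl_cons]
    have hstep := pvStep rows w
    simp only at hstep ⊢
    rw [hstep]
    rw [show rows.length + 1 = (rows ++ [w.toList.map (fun c => String.ofList [c])]).length by simp,
      ih (rows ++ [w.toList.map (fun c => String.ofList [c])])]
    rw [List.append_assoc, List.singleton_append, List.map_cons]
    congr 1
    simp only [List.length_append, List.length_cons, List.length_nil]
    omega

theorem sep_str_alt_eq_pvCols (st : String) :
    sep_str_alt st = pvCols (((PySem.Str.split? st " ").getD []).map
      (fun w => w.toList.map (fun c => String.ofList [c]))) := by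
  simp only [sep_str_alt]
  rw [show (([] : List (List String)), (0 : Nat))
      = (pvCols [], ([] : List (List String)).length) from by simp [pvCols, pvMaxLen],
    pvFoldB]
  simp

-- ===== VERDICT (by name: the statement is the Claim_ definition above) =====
theorem sep_str_spec : Claim_equal_sep_str := by
  intro st _
  unfold Spec_sep_str
  rw [sep_str_eq_pvCols, sep_str_alt_eq_pvCols]
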